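-- pv_equiv track=rewrite | github.com/rajib13/ProblemSolving | problems/overlapping_events.py | find_overlapped_events
-- ===== SOURCE A (Python) =====
-- def find_overlapped_events(sequence):
--     overlapped = []
--     max_end_time = sequence[0][1]
--     flag = True
--     for i in range(1,len(sequence)):
--             if(max_end_time >= sequence[i][0]):
--                 if(flag):
--                     overlapped.append(sequence[i-1])
--                     flag = False
--                 overlapped.append(sequence[i])
--                 max_end_time = max(max_end_time, sequence[i][1])
--             else:
--                 max_end_time = sequence[i][1]
--                 flag = True
--
--     return overlapped
-- ===== SOURCE B (Python) =====
-- def find_overlapped_events(sequence):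
--     # Group events into clusters of transitively overlapping neighbors, then
--     # keep (concatenated, in order) only the clusters holding at least 2 events.
--     clusters = []
--     cluster = [sequence[0]]
--     max_end = sequence[0][1]
--     for ev in sequence[1:]:
--         if max_end >= ev[0]:
--             cluster.append(ev)
--             if ev[1] > max_end:
--                 max_end = ev[1]
--         else:
--             clusters.append(cluster)
--             cluster = [ev]
--             max_end = ev[1]
--     clusters.append(cluster)
--     result = []
--     for c in clusters:
--         if len(c) >= 2:
--             result.extend(c)
--     return result
-- ===== Notes on version B (the rewrite author's own statement) =====
-- stated objective: alternative
-- what changed: Replaces the flag-driven inline emission with an explicit two-phase algorithm: first group events into clusters of chained overlaps, then concatenate the clusters of length >= 2.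
-- outside the precondition, e.g. on find_overlapped_events([]): A raises IndexError, B raises IndexError
import Mathlib
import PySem

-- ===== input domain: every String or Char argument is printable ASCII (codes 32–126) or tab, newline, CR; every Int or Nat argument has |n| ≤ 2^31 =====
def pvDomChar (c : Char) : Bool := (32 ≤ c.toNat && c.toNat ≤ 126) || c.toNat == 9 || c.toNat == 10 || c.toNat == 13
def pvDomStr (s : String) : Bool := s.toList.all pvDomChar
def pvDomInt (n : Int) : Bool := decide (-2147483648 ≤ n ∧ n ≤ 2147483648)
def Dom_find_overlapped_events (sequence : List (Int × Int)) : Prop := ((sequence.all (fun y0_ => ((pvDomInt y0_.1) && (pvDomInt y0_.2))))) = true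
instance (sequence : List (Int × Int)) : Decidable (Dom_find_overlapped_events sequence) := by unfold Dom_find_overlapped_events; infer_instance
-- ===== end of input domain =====

-- B: explicit clustering pass followed by a length-≥-2 filtering pass, instead of A's flag trick.

-- ===== PORT A =====
-- A's loop over i in range(1, len) reads sequence[i] and sequence[i-1]; ported as a
-- recursion carrying the previous element `prev` with the same state (overlapped, max_end_time, flag).
def pvALoop (prev : Int × Int) (rest : List (Int × Int)) (overlapped : List (Int × Int))
    (max_end_time : Int) (flag : Bool) : List (Int × Int) :=
  match rest with
  | [] => overlapped
  | cur :: rest' =>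
    if max_end_time ≥ cur.1 then
      let overlapped' := if flag then overlapped ++ [prev] else overlapped
      pvALoop cur rest' (overlapped' ++ [cur]) (max max_end_time cur.2) false
    else
      pvALoop cur rest' overlapped cur.2 true

def find_overlapped_events (sequence : List (Int × Int)) : List (Int × Int) :=
  match sequence with
  | [] => []   -- Python raises IndexError here; excluded by Pre_
  | x :: rest => pvALoop x rest [] x.2 true

-- ===== PORT B =====
-- phase 1 of Source B: build the list of clusters
def pvBLoop (rest : List (Int × Int)) (cluster : List (Int × Int)) (max_end : Int)
    (clusters : List (List (Int × Int))) : List (List (Int × Int)) :=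
  match rest with
  | [] => clusters ++ [cluster]
  | ev :: rest' =>
    if max_end ≥ ev.1 then
      pvBLoop rest' (cluster ++ [ev]) (if ev.2 > max_end then ev.2 else max_end) clusters
    else
      pvBLoop rest' [ev] ev.2 (clusters ++ [cluster])

def find_overlapped_events_alt (sequence : List (Int × Int)) : List (Int × Int) :=
  match sequence with
  | [] => []   -- Source B raises IndexError here; excluded by Pre_
  | x :: rest =>
    -- phase 2: concatenate the clusters of length >= 2
    (pvBLoop rest [x] x.2 []).foldl
      (fun result c => if 2 ≤ c.length then result ++ c else result) []

-- ===== PRECONDITION & SPEC =====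
-- Pre_ excludes the empty list, on which both A and B raise IndexError (sequence[0]).
def Pre_find_overlapped_events (sequence : List (Int × Int)) : Prop := sequence ≠ []
instance (sequence : List (Int × Int)) : Decidable (Pre_find_overlapped_events sequence) := by
  unfold Pre_find_overlapped_events; infer_instance

def pvWitness_find_overlapped_events : (List (Int × Int)) := [(1, 3), (2, 4), (6, 7)]

def Spec_find_overlapped_events (sequence : List (Int × Int)) (out : List (Int × Int)) : Prop := out = find_overlapped_events_alt sequence
instance (sequence : List (Int × Int)) (out : List (Int × Int)) : Decidable (Spec_find_overlapped_events sequence out) := by unfold Spec_find_overlapped_events; infer_instance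

-- ===== CLAIM (what is proved, stated in full; the proofs are below) =====
def Claim_equal_find_overlapped_events : Prop := ∀ (sequence : List (Int × Int)), Dom_find_overlapped_events sequence → Pre_find_overlapped_events sequence → Spec_find_overlapped_events sequence (find_overlapped_events sequence)

-- ===== LEMMAS AND PROOFS =====

-- abbreviation for B's filtering pass (phase 2), used only by the proofs
def pvFilt (cs : List (List (Int × Int))) : List (Int × Int) :=
  cs.foldl (fun result c => if 2 ≤ c.length then result ++ c else result) []

lemma pvFilt_concat (cs : List (List (Int × Int))) (c : List (Int × Int)) :
    pvFilt (cs ++ [c]) = pvFilt cs ++ (if 2 ≤ c.length then c else []) := by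
  unfold pvFilt
  rw [List.foldl_append]
  simp only [List.foldl_cons, List.foldl_nil]
  split_ifs <;> simp

-- The loop invariant: A's state (overlapped, flag) corresponds to B's state
-- (clusters so far, current cluster); flag = true iff the current cluster is the
-- singleton [prev], and A's overlapped is the filtered output of the clusters so far
-- (plus the current cluster once it has reached length 2, i.e. when flag = false).
lemma pvALoop_eq_filt (rest : List (Int × Int)) :
    ∀ (prev : Int × Int) (max_end : Int) (ov : List (Int × Int)) (flag : Bool)
      (cluster : List (Int × Int)) (clusters : List (List (Int × Int))),
      (flag = true → cluster = [prev]) →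
      (flag = false → 2 ≤ cluster.length) →
      ov = (if flag then pvFilt clusters else pvFilt clusters ++ cluster) →
      pvALoop prev rest ov max_end flag = pvFilt (pvBLoop rest cluster max_end clusters) := by
  induction rest with
  | nil =>
    intro prev max_end ov flag cluster clusters h1 h2 h3
    simp only [pvALoop, pvBLoop, pvFilt_concat]
    cases flag with
    | true =>
      have hc := h1 rfl
      subst hc
      simp at h3 ⊢
      exact h3
    | false =>
      have hc := h2 rfl
      simp at h3
      rw [h3, if_pos hc]
  | cons cur rest' ih =>
    intro prev max_end ov flag cluster clusters h1 h2 h3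
    simp only [pvALoop, pvBLoop]
    by_cases hge : max_end ≥ cur.1
    · rw [if_pos hge, if_pos hge]
      have hmax : max max_end cur.2 = (if cur.2 > max_end then cur.2 else max_end) := by
        split_ifs <;> omega
      rw [hmax]
      cases flag with
      | true =>
        have hc := h1 rfl
        subst hc
        apply ih
        · intro h; cases h
        · intro _; simp
        · simp at h3; subst h3; simp
      | false =>
        have hc := h2 rfl
        apply ih
        · intro h; cases h
        · intro _; simp; omega
        · simp at h3 ⊢; subst h3; simp
    · rw [if_neg hge, if_neg hge]
      apply ih
      · intro _; rfl
      · intro h; cases h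
      · rw [pvFilt_concat]
        cases flag with
        | true =>
          have hc := h1 rfl
          subst hc
          simp at h3 ⊢
          exact h3
        | false =>
          have hc := h2 rfl
          simp at h3 ⊢
          rw [h3, if_pos hc]

-- ===== VERDICT (by name: the statement is the Claim_ definition above) =====
theorem find_overlapped_events_spec : Claim_equal_find_overlapped_events := by
  intro sequence _ hpre
  unfold Spec_find_overlapped_events
  match sequence with
  | [] => exact absurd rfl hpre
  | x :: rest =>
    show pvALoop x rest [] x.2 true = _
    unfold find_overlapped_events_alt
    rw [pvALoop_eq_filt rest x x.2 [] true [x] []]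
    · rfl
    · intro _; rfl
    · intro h; cases h
    · rfl
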